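-- pv_equiv track=rewrite | github.com/Dong-Kyu-Lee7/programmers | 프로그래머스/0/120883. 로그인 성공？/로그인 성공？.py | solution
-- ===== SOURCE A (Python) =====
-- def solution(id_pw, db):
--     result = 'fail'
--     for x in db:
--         if x == id_pw:
--             result = 'login'
--         elif x[0] == id_pw[0]:
--             result = 'wrong pw'
--     return result
-- ===== SOURCE B (Python) =====
-- def solution(id_pw, db):
--     for x in reversed(db):
--         if x == id_pw:
--             return 'login'
--         if x[0] == id_pw[0]:
--             return 'wrong pw'
--     return 'fail'
-- ===== Notes on version B (the rewrite author's own statement) =====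
-- stated objective: alternative
-- what changed: Scans db back-to-front and returns at the FIRST entry matching id_pw's id (last-match-wins becomes first-match in reverse with early exit), instead of A's full forward scan that keeps overwriting an accumulator string.
import Mathlib
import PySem

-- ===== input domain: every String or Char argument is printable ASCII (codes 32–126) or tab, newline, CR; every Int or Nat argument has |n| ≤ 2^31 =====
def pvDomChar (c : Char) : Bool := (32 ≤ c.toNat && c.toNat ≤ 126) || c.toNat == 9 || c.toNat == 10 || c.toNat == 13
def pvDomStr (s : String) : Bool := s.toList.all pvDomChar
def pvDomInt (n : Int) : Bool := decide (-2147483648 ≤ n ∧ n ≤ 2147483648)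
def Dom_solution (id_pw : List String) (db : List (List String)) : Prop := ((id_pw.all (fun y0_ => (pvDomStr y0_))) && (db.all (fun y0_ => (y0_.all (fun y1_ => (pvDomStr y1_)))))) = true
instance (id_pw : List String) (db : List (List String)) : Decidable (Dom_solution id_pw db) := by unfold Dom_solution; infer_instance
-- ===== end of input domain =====

-- B scans db back-to-front with an early exit at the first id match, instead of A's
-- full forward scan overwriting an accumulator (alternative decomposition, same cost).


-- ===== PORT A =====
-- x[0] / id_pw[0] are evaluated only when x ≠ id_pw; inside Pre_ both lists are then
-- nonempty there, so headD "" is exact (outside Pre_ the Python raises IndexError).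
def solution (id_pw : List String) (db : List (List String)) : String :=
  db.foldl (fun result x =>
    if x = id_pw then "login"
    else if x.headD "" = id_pw.headD "" then "wrong pw"
    else result) "fail"

-- ===== PORT B =====
-- B's early-return loop body as structural recursion; x[0] / id_pw[0] are evaluated
-- only when x ≠ id_pw, where Pre_ makes both nonempty, so headD "" is exact.
def solutionAltLoop (id_pw : List String) : List (List String) → String
  | [] => "fail"
  | x :: xs =>
      if x = id_pw then "login"
      else if x.headD "" = id_pw.headD "" then "wrong pw"
      else solutionAltLoop id_pw xs

def solution_alt (id_pw : List String) (db : List (List String)) : String :=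
  solutionAltLoop id_pw db.reverse

-- ===== PRECONDITION & SPEC =====
-- Pre_ is exactly the inputs on which the Python A returns: wherever a db entry x with
-- x ≠ id_pw is compared, x[0] and id_pw[0] must exist, i.e. each entry is empty iff
-- id_pw is empty (otherwise A raises IndexError).
def Pre_solution (id_pw : List String) (db : List (List String)) : Prop :=
  ∀ x ∈ db, (x = [] ↔ id_pw = [])
instance (id_pw : List String) (db : List (List String)) : Decidable (Pre_solution id_pw db) := by unfold Pre_solution; infer_instance
def pvWitness_solution : List String × List (List String) :=
  (["meosseugi", "1234"], [["rardss", "123"], ["meosseugi", "1234"], ["sein", "2345"]])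
def Spec_solution (id_pw : List String) (db : List (List String)) (out : String) : Prop := out = solution_alt id_pw db
instance (id_pw : List String) (db : List (List String)) (out : String) : Decidable (Spec_solution id_pw db out) := by unfold Spec_solution; infer_instance

-- ===== CLAIM (what is proved, stated in full; the proofs are below) =====
def Claim_equal_solution : Prop := ∀ (id_pw : List String) (db : List (List String)), Dom_solution id_pw db → Pre_solution id_pw db → Spec_solution id_pw db (solution id_pw db)

-- ===== LEMMAS AND PROOFS =====

-- B's early-exit recursion is the foldr of A's step with the arguments flipped.
theorem altLoop_eq_foldr (id_pw : List String) (l : List (List String)) :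
    solutionAltLoop id_pw l
      = l.foldr (fun x r =>
          if x = id_pw then "login"
          else if x.headD "" = id_pw.headD "" then "wrong pw"
          else r) "fail" := by
  induction l with
  | nil => rfl
  | cons x xs ih => simp [solutionAltLoop, ih]

-- ===== VERDICT (by name: the statement is the Claim_ definition above) =====
theorem solution_spec : Claim_equal_solution := by
  intro id_pw db _ _
  unfold Spec_solution solution solution_alt
  rw [altLoop_eq_foldr, ← List.foldl_reverse, List.reverse_reverse]
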